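-- pv_equiv track=rewrite | github.com/saurabhchris1/Algorithm-Pratice-Questions-LeetCode | Min_Steps_to_Make_Piles_Equal_Height.py | min_steps_balance
-- ===== SOURCE A (Python) =====
-- def min_steps_balance(piles):
--     """
--     Time  : O(N log N)
--     Space : O(1), where N = len(s)
--     """
--
--     # EDGE CASE
--     if len(piles) < 2:
--         return 0
--
--     # SORT THE BLOCKS
--     piles = sorted(piles, reverse=True)
--
--     # COUNT THE STEPS WE NEED
--     steps = 0
--
--     # EACH TIME WE SEE A DIFFERENT ELEMENT, WE NEED TO SEE HOW MANY ELEMENTS ARE BEFORE IT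
--     for i in range(1, len(piles)):
--         steps += i if piles[i - 1] != piles[i] else 0
--
--     return steps
-- ===== SOURCE B (Python) =====
-- def min_steps_balance(piles):
--     # Frequency map of heights, then one pass over the distinct heights in
--     # descending order, keeping a running count of piles already processed.
--     cnt = {}
--     for x in piles:
--         cnt[x] = cnt.get(x, 0) + 1
--     steps = seen = 0
--     for v in sorted(cnt, reverse=True):
--         steps += seen
--         seen += cnt[v]
--     return steps
-- ===== Notes on version B (the rewrite author's own statement) =====
-- stated objective: alternative
-- what changed: Replaces sort-all + indexed adjacent-difference scan with a frequency map and a single grouped pass over the distinct heights in descending order maintaining a running count of strictly taller piles.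
import Mathlib
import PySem

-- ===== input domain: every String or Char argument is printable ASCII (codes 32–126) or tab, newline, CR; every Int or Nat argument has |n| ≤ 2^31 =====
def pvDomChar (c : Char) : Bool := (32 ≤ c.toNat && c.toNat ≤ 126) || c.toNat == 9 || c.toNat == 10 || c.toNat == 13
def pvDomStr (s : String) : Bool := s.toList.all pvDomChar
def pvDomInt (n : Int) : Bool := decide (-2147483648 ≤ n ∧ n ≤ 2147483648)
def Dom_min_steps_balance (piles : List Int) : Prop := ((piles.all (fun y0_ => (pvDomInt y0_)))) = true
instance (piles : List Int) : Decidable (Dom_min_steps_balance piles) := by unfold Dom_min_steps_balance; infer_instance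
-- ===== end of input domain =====

-- B replaces A's sort-the-whole-list + indexed adjacent-difference scan with a frequency map
-- and one grouped pass over the distinct heights in descending order (objective: alternative).


-- ===== PORT A =====
-- for i in range(1, len(p)): steps += i if p[i-1] != p[i] else 0
-- (indices i-1, i are always in range, so pyGetD with default 0 is exact here)
def min_steps_balance (piles : List Int) : Int :=
  if piles.length < 2 then 0
  else
    let p := PySem.List.sorted piles (fun x => x) true
    (PySem.List.pyRange 1 (p.length : Int) 1).foldl
      (fun steps i =>
        steps + (if PySem.List.pyGetD p (i - 1) 0 ≠ PySem.List.pyGetD p i 0 then i else 0)) 0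

-- ===== PORT B =====
-- cnt = {}; for x in piles: cnt[x] = cnt.get(x, 0) + 1
-- steps = seen = 0
-- for v in sorted(cnt, reverse=True): steps += seen; seen += cnt[v]
-- (iterating sorted(cnt) is iterating the sorted key list)
def min_steps_balance_alt (piles : List Int) : Int :=
  let cnt : PySem.Dict Int Int :=
    piles.foldl (fun d x => d.insert x (d.getD x 0 + 1)) PySem.Dict.empty
  ((PySem.List.sorted cnt.keys (fun v => v) true).foldl
      (fun (p : Int × Int) v => (p.1 + p.2, p.2 + cnt.getD v 0)) (0, 0)).1

-- ===== PRECONDITION & SPEC =====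
def Spec_min_steps_balance (piles : List Int) (out : Int) : Prop := out = min_steps_balance_alt piles
instance (piles : List Int) (out : Int) : Decidable (Spec_min_steps_balance piles out) := by unfold Spec_min_steps_balance; infer_instance

-- ===== CLAIM (what is proved, stated in full; the proofs are below) =====
def Claim_equal_min_steps_balance : Prop := ∀ (piles : List Int), Dom_min_steps_balance piles → Spec_min_steps_balance piles (min_steps_balance piles)

-- ===== LEMMAS AND PROOFS =====

-- A's loop, as a structural recursion over the sorted list (i = index of the second element of the pair)
def adjSum : List Int → Int → Int
  | a :: b :: t, i => (if a ≠ b then i else 0) + adjSum (b :: t) (i + 1)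
  | _, _ => 0

-- B's total, over an arbitrary nodup value list L and count source s
def gtSum (L s : List Int) : Int :=
  (L.map (fun v => (s.countP (fun x => decide (v < x)) : Int))).sum

lemma countP_split (v : Int) (l : List Int) (p q : Int → Bool)
    (h : ∀ x ∈ l, (q x = true ↔ (p x = true ∨ x = v)))
    (hd : ∀ x ∈ l, ¬(p x = true ∧ x = v)) :
    (l.countP q : Int) = l.countP p + l.count v := by
  induction l with
  | nil => simp
  | cons x t ih =>
    have hx := h x List.mem_cons_self
    have hdx := hd x List.mem_cons_self
    have iht := ih (fun y hy => h y (List.mem_cons_of_mem _ hy))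
      (fun y hy => hd y (List.mem_cons_of_mem _ hy))
    rw [List.countP_cons, List.countP_cons, List.count_cons]
    by_cases hp : p x = true
    · have hxv : ¬ x = v := fun he => hdx ⟨hp, he⟩
      have hq : q x = true := hx.mpr (Or.inl hp)
      rw [if_pos hq, if_pos hp, if_neg (fun h => hxv (by simpa using h))]
      push_cast
      omega
    · by_cases hxv : x = v
      · have hq : q x = true := hx.mpr (Or.inr hxv)
        rw [if_pos hq, if_neg hp, if_pos (show (x == v) = true by simpa using hxv)]
        push_cast
        omega
      · have hq : ¬ q x = true := fun hq => (hx.mp hq).elim hp hxv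
        rw [if_neg hq, if_neg hp, if_neg (fun h => hxv (by simpa using h))]
        push_cast
        omega

-- B's grouped pass: fold with a running 'seen' count over a strictly descending
-- complete value list sums, per distinct value, the number of strictly greater elements
lemma seenFold (piles : List Int) (c : Int → Int) (hc : ∀ v, c v = (piles.count v : Int)) :
    ∀ (vs : List Int) (st sn : Int),
      vs.Pairwise (fun a b => b < a) →
      (∀ x ∈ piles, x ∈ vs ∨ (∀ u ∈ vs, u < x)) →
      sn = (piles.countP (fun x => decide (∀ u ∈ vs, u < x)) : Int) →
      (vs.foldl (fun (p : Int × Int) v => (p.1 + p.2, p.2 + c v)) (st, sn)).1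
        = st + gtSum vs piles
  | [], st, sn, _, _, _ => by simp [gtSum]
  | v :: rest, st, sn, hsort, hcover, hsn => by
    have hlt : ∀ u ∈ rest, u < v := (List.pairwise_cons.mp hsort).1
    have hsort' : rest.Pairwise (fun a b => b < a) := (List.pairwise_cons.mp hsort).2
    have hsnv : sn = (piles.countP (fun x => decide (v < x)) : Int) := by
      rw [hsn]
      congr 1
      apply List.countP_congr
      intro x _
      simp only [decide_eq_true_eq]
      constructor
      · exact fun h => h v List.mem_cons_self
      · intro hvx u hu
        rcases List.mem_cons.mp hu with rfl | hu'
        · exact hvx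
        · exact lt_trans (hlt u hu') hvx
    have hcover' : ∀ x ∈ piles, x ∈ rest ∨ (∀ u ∈ rest, u < x) := by
      intro x hx
      rcases hcover x hx with hmem | hall
      · rcases List.mem_cons.mp hmem with rfl | h'
        · exact Or.inr hlt
        · exact Or.inl h'
      · exact Or.inr (fun u hu => hall u (List.mem_cons_of_mem _ hu))
    have hsn' : sn + c v = (piles.countP (fun x => decide (∀ u ∈ rest, u < x)) : Int) := by
      rw [hsnv, hc v,
        countP_split v piles (fun x => decide (v < x)) (fun x => decide (∀ u ∈ rest, u < x))
          (by
            intro x hx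
            simp only [decide_eq_true_eq]
            constructor
            · intro hall
              rcases hcover x hx with hmem | hfull
              · rcases List.mem_cons.mp hmem with rfl | h'
                · exact Or.inr rfl
                · exact absurd (hall x h') (lt_irrefl x)
              · exact Or.inl (hfull v List.mem_cons_self)
            · rintro (hvx | rfl)
              · exact fun u hu => lt_trans (hlt u hu) hvx
              · exact hlt)
          (by
            rintro x _ ⟨hvx, rfl⟩
            exact lt_irrefl x (of_decide_eq_true hvx))]
    rw [List.foldl_cons]
    rw [seenFold piles c hc rest (st + sn) (sn + c v) hsort' hcover' hsn']
    unfold gtSum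
    rw [hsnv]
    simp only [List.map_cons, List.sum_cons]
    ring

lemma alt_eq_gtSum (piles : List Int) :
    min_steps_balance_alt piles
      = gtSum (PySem.List.sorted (PySem.Set.ofList piles) (fun v => v) true) piles := by
  unfold min_steps_balance_alt
  simp only [PySem.Dict.foldl_insert_getD_add_one_eq_counter, PySem.Dict.keys_counter,
    PySem.Dict.getD_counter]
  set vals := PySem.List.sorted (PySem.Set.ofList piles) (fun v => v) true with hvals
  have hperm : vals.Perm (PySem.Set.ofList piles) :=
    PySem.List.sorted_perm (PySem.Set.ofList piles) (fun v => v) true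
  have hnd : vals.Nodup := hperm.nodup_iff.mpr (PySem.Set.nodup_ofList piles)
  have hle : vals.Pairwise (fun a b => b ≤ a) :=
    PySem.List.sorted_pairwise_rev (PySem.Set.ofList piles) (fun v => v)
  have hsort : vals.Pairwise (fun a b => b < a) :=
    (hle.and hnd).imp (fun h => lt_of_le_of_ne h.1 h.2.symm)
  have hmemv : ∀ x, x ∈ vals ↔ x ∈ piles := by
    intro x
    rw [hperm.mem_iff, PySem.Set.mem_ofList]
  have hcover : ∀ x ∈ piles, x ∈ vals ∨ (∀ u ∈ vals, u < x) :=
    fun x hx => Or.inl ((hmemv x).mpr hx)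
  have hsn0 : (0 : Int) = (piles.countP (fun x => decide (∀ u ∈ vals, u < x)) : Int) := by
    have : piles.countP (fun x => decide (∀ u ∈ vals, u < x)) = 0 := by
      rw [List.countP_eq_zero]
      intro x hx
      simp only [decide_eq_true_eq, not_forall]
      exact ⟨x, (hmemv x).mpr hx, lt_irrefl x⟩
    omega
  simpa using seenFold piles (fun v => (piles.count v : Int)) (fun _ => rfl) vals 0 0 hsort hcover hsn0

-- the A-side foldl over range(1, len p) is adjSum p 1
lemma foldA_gen (q p : List Int) (j : Int) (hj : 1 ≤ j)
    (hq : p.drop (j - 1).toNat = q) (c : Int) :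
    (PySem.List.pyRange j (p.length : Int) 1).foldl
      (fun steps i =>
        steps + (if PySem.List.pyGetD p (i - 1) 0 ≠ PySem.List.pyGetD p i 0 then i else 0)) c
      = c + adjSum q j := by
  induction q generalizing j c with
  | nil =>
    have hlen : (p.length : Int) ≤ j := by
      have := congrArg List.length hq
      simp [List.length_drop] at this
      omega
    rw [PySem.List.pyRange_one_eq_nil hlen]
    simp [adjSum]
  | cons a t ih =>
    cases t with
    | nil =>
      have hlen : (p.length : Int) = j := by
        have := congrArg List.length hq
        simp [List.length_drop] at this
        omega
      rw [← hlen, PySem.List.pyRange_one_eq_nil (le_refl _)]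
      simp [adjSum]
    | cons b t' =>
      have hlt : j < (p.length : Int) := by
        have := congrArg List.length hq
        simp [List.length_drop] at this
        omega
      have hdrop' : p.drop j.toNat = b :: t' := by
        have h2 : List.drop 1 (List.drop (j - 1).toNat p) = List.drop ((j - 1).toNat + 1) p :=
          List.drop_drop
        rw [hq] at h2
        rw [show (j - 1).toNat + 1 = j.toNat from by omega] at h2
        simpa using h2.symm
      have hga : PySem.List.pyGetD p (j - 1) 0 = a := by
        rw [PySem.List.pyGetD_eq_getElem p 0 (by omega) (by omega)]
        have h1 : p[(j - 1).toNat + 0]? = some a := by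
          rw [← List.getElem?_drop, hq]
          rfl
        simp only [Nat.add_zero] at h1
        obtain ⟨_, h⟩ := List.getElem?_eq_some_iff.mp h1
        exact h
      have hgb : PySem.List.pyGetD p j 0 = b := by
        rw [PySem.List.pyGetD_eq_getElem p 0 (by omega) hlt]
        have h1 : p[(j - 1).toNat + 1]? = some b := by
          rw [← List.getElem?_drop, hq]
          rfl
        rw [show (j - 1).toNat + 1 = j.toNat from by omega] at h1
        obtain ⟨_, h⟩ := List.getElem?_eq_some_iff.mp h1
        exact h
      rw [PySem.List.pyRange_one_cons hlt]
      simp only [List.foldl_cons]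
      rw [ih (j + 1) (by omega) (by simpa [show ((j : Int) + 1 - 1).toNat = j.toNat from by omega] using hdrop') _]
      simp only [adjSum, hga, hgb]
      by_cases h : a = b
      · simp [h]
      · simp only [h, ne_eq, not_false_eq_true, if_pos]
        ring

-- all v in L are < a : each contributes 1
lemma sum_ind_all (a : Int) (L : List Int) (h : ∀ v ∈ L, v < a) :
    (L.map (fun v => if v < a then (1 : Int) else 0)).sum = L.length := by
  induction L with
  | nil => simp
  | cons x t ih =>
    have hx := h x (List.mem_cons_self)
    rw [List.map_cons, List.sum_cons, if_pos hx,
      ih (fun v hv => h v (List.mem_cons_of_mem _ hv)), List.length_cons]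
    push_cast
    ring

-- L nodup, a ∈ L, all v ≤ a : strictly-smaller indicator sums to |L| - 1
lemma sum_ind_mem (a : Int) (L : List Int) (hN : L.Nodup) (ha : a ∈ L)
    (hle : ∀ v ∈ L, v ≤ a) :
    (L.map (fun v => if v < a then (1 : Int) else 0)).sum = L.length - 1 := by
  induction L with
  | nil => simp at ha
  | cons x t ih =>
    rcases List.mem_cons.mp ha with h1 | hat
    · subst h1
      have hnx : a ∉ t := (List.nodup_cons.mp hN).1
      have hall : ∀ v ∈ t, v < a := fun v hv =>
        lt_of_le_of_ne (hle v (List.mem_cons_of_mem _ hv)) (fun h => hnx (h ▸ hv))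
      rw [List.map_cons, List.sum_cons, if_neg (lt_irrefl a), sum_ind_all a t hall,
        List.length_cons]
      push_cast
      ring
    · have hxa : x ≤ a := hle x List.mem_cons_self
      have hxne : x ≠ a := fun h => (List.nodup_cons.mp hN).1 (h ▸ hat)
      have hxa' : x < a := lt_of_le_of_ne hxa hxne
      rw [List.map_cons, List.sum_cons, if_pos hxa',
        ih (List.nodup_cons.mp hN).2 hat (fun v hv => hle v (List.mem_cons_of_mem _ hv)),
        List.length_cons]
      push_cast
      ring

-- core: on a descending-sorted nonempty list, adjSum at offset m+1 matches the grouped count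
lemma adjSum_eq (s : List Int) (hs : s.Pairwise (fun a b => b ≤ a)) (hne : s ≠ []) (m : Int) :
    adjSum s (m + 1) = m * ((s.dedup.length : Int) - 1) + gtSum s.dedup s := by
  induction s generalizing m with
  | nil => exact absurd rfl hne
  | cons a t ih =>
    have hle : ∀ x ∈ t, x ≤ a := fun x hx => (List.pairwise_cons.mp hs).1 x hx
    have hpt : t.Pairwise (fun a b => b ≤ a) := (List.pairwise_cons.mp hs).2
    cases t with
    | nil =>
      simp [adjSum, gtSum]
    | cons b t' =>
      have hbt : ∀ x ∈ b :: t', x ≤ b := by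
        intro x hx
        rcases List.mem_cons.mp hx with rfl | hx'
        · exact le_refl x
        · exact (List.pairwise_cons.mp hpt).1 x hx'
      have ihm := ih hpt (by simp) (m + 1)
      by_cases hab : a = b
      · -- a ∈ t, dedup unchanged
        subst hab
        have hmem : a ∈ a :: t' := by simp
        have hded : (a :: a :: t').dedup = (a :: t').dedup := List.dedup_cons_of_mem hmem
        have hcount : gtSum (a :: t').dedup (a :: a :: t')
            = gtSum (a :: t').dedup (a :: t') + ((a :: t').dedup.length - 1) := by
          unfold gtSum
          have hmap : ((a :: t').dedup.map (fun v => ((a :: a :: t').countP (fun x => decide (v < x)) : Int)))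
              = ((a :: t').dedup.map (fun v => ((a :: t').countP (fun x => decide (v < x)) : Int)
                 + (if v < a then (1 : Int) else 0))) := by
            apply List.map_congr_left
            intro v _
            rw [List.countP_cons]
            by_cases h : v < a
            · simp only [h, decide_true, if_true]
              push_cast
              ring
            · simp [h]
          rw [hmap, PySem.List.sum_map_add_int]
          congr 1
          exact sum_ind_mem a (a :: t').dedup (List.nodup_dedup _)
            (List.mem_dedup.mpr hmem)
            (fun v hv => hle v (List.mem_dedup.mp hv))
        have step : adjSum (a :: a :: t') (m + 1) = adjSum (a :: t') (m + 1 + 1) := by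
          simp [adjSum]
        rw [step, ihm, hded, hcount]
        ring
      · -- a > every element of t; dedup gains a
        have hbne : b ∉ ([] : List Int) := by simp
        have hblt : b < a := lt_of_le_of_ne (hle b (by simp)) (fun h => hab h.symm)
        have hlt : ∀ x ∈ b :: t', x < a := fun x hx => lt_of_le_of_lt (hbt x hx) hblt
        have hnotmem : a ∉ b :: t' := fun h => lt_irrefl a (hlt a h)
        have hded : (a :: b :: t').dedup = a :: (b :: t').dedup :=
          List.dedup_cons_of_notMem hnotmem
        have hcounta : ((a :: b :: t').countP (fun x => decide (a < x)) : Int) = 0 := by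
          have : (a :: b :: t').countP (fun x => decide (a < x)) = 0 := by
            rw [List.countP_eq_zero]
            intro x hx
            rcases List.mem_cons.mp hx with rfl | hx'
            · simp
            · simp [not_lt.mpr (le_of_lt (hlt x hx'))]
          exact_mod_cast this
        have hcount : gtSum (a :: b :: t').dedup (a :: b :: t')
            = gtSum (b :: t').dedup (b :: t') + (b :: t').dedup.length := by
          rw [hded]
          unfold gtSum
          simp only [List.map_cons, List.sum_cons, hcounta]
          have hmap : ((b :: t').dedup.map (fun v => ((a :: b :: t').countP (fun x => decide (v < x)) : Int)))
              = ((b :: t').dedup.map (fun v => ((b :: t').countP (fun x => decide (v < x)) : Int)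
                 + (if v < a then (1 : Int) else 0))) := by
            apply List.map_congr_left
            intro v _
            rw [List.countP_cons]
            by_cases h : v < a
            · simp only [h, decide_true, if_true]
              push_cast
              ring
            · simp [h]
          rw [hmap, PySem.List.sum_map_add_int]
          have hall : ∀ v ∈ (b :: t').dedup, v < a :=
            fun v hv => hlt v (List.mem_dedup.mp hv)
          rw [sum_ind_all a _ hall]
          ring
        have step : adjSum (a :: b :: t') (m + 1)
            = (m + 1) + adjSum (b :: t') (m + 1 + 1) := by
          simp [adjSum, hab]
        rw [step, ihm, hcount, hded]
        simp only [List.length_cons]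
        push_cast
        ring

-- gtSum is stable under replacing both the value list (perm of nodups) and the count source (perm)
lemma gtSum_perm (L1 L2 s1 s2 : List Int) (hL : L1.Perm L2) (hs : s1.Perm s2) :
    gtSum L1 s1 = gtSum L2 s2 := by
  unfold gtSum
  have h1 : ∀ v : Int, s1.countP (fun x => decide (v < x)) = s2.countP (fun x => decide (v < x)) :=
    fun v => hs.countP_eq _
  calc (L1.map (fun v => (s1.countP (fun x => decide (v < x)) : Int))).sum
      = (L1.map (fun v => (s2.countP (fun x => decide (v < x)) : Int))).sum := by
        simp only [h1]
    _ = (L2.map (fun v => (s2.countP (fun x => decide (v < x)) : Int))).sum :=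
        (hL.map _).sum_eq

theorem min_steps_balance_spec_aux (piles : List Int) :
    min_steps_balance piles = min_steps_balance_alt piles := by
  unfold min_steps_balance
  set s := PySem.List.sorted piles (fun x => x) true with hsdef
  have hperm : s.Perm piles := PySem.List.sorted_perm piles (fun x => x) true
  have haltB : min_steps_balance_alt piles = gtSum s.dedup s := by
    rw [alt_eq_gtSum]
    apply gtSum_perm
    · have hpv : (PySem.List.sorted (PySem.Set.ofList piles) (fun v => v) true).Perm
          (PySem.Set.ofList piles) :=
        PySem.List.sorted_perm (PySem.Set.ofList piles) (fun v => v) true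
      rw [List.perm_ext_iff_of_nodup (hpv.nodup_iff.mpr (PySem.Set.nodup_ofList piles))
        (List.nodup_dedup s)]
      intro x
      rw [hpv.mem_iff, PySem.Set.mem_ofList, List.mem_dedup]
      exact ⟨fun h => hperm.symm.mem_iff.mp h, fun h => hperm.mem_iff.mp h⟩
    · exact hperm.symm
  by_cases hlen : piles.length < 2
  · -- 0, 1 element: both sides are 0
    rw [if_pos hlen, haltB]
    have hslen : s.length < 2 := by rw [hperm.length_eq]; exact hlen
    match s, hslen with
    | [], _ => simp [gtSum]
    | [a], _ => simp [gtSum]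
  · rw [if_neg hlen, haltB]
    have hne : s ≠ [] := by
      intro h
      rw [h] at hperm
      have := hperm.length_eq
      simp at this
      omega
    have hpair : s.Pairwise (fun a b => b ≤ a) := by
      simpa using PySem.List.sorted_pairwise_rev piles (fun x => x)
    have h := foldA_gen s s 1 (le_refl _) (by simp) 0
    rw [h]
    have := adjSum_eq s hpair hne 0
    simpa using this

-- ===== VERDICT (by name: the statement is the Claim_ definition above) =====
theorem min_steps_balance_spec : Claim_equal_min_steps_balance := by
  intro piles _
  unfold Spec_min_steps_balance
  exact min_steps_balance_spec_aux piles
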